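-- pv_equiv track=rewrite | github.com/julio-garbers/website_languages_lux | website_languages_lux/script/01_extract_languages_lux.py | parse_regex_result
-- ===== SOURCE A (Python) =====
-- def parse_regex_result(regex_str: str | None) -> dict[str, bool]:
--     """Convert regex result string back to dict of booleans."""
--     result = {
--         "fr": False,
--         "de": False,
--         "en": False,
--         "lb": False,
--         "pt": False,
--         "nl": False,
--         "other": False,
--     }
--     if regex_str:
--         for lang in regex_str.split(","):
--             if lang in result:
--                 result[lang] = True
--     return result
-- ===== SOURCE B (Python) =====
-- def parse_regex_result(regex_str):
--     """Convert regex result string back to dict of booleans."""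
--     toks = set(regex_str.split(",")) if regex_str else set()
--     return {k: k in toks for k in ("fr", "de", "en", "lb", "pt", "nl", "other")}
-- ===== Notes on version B (the rewrite author's own statement) =====
-- stated objective: idiomatic
-- what changed: B inverts the traversal: instead of mutating an accumulator dict while looping over the input tokens, it builds a membership set of tokens once and produces the dict by a comprehension over the fixed seven keys.
import Mathlib
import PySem

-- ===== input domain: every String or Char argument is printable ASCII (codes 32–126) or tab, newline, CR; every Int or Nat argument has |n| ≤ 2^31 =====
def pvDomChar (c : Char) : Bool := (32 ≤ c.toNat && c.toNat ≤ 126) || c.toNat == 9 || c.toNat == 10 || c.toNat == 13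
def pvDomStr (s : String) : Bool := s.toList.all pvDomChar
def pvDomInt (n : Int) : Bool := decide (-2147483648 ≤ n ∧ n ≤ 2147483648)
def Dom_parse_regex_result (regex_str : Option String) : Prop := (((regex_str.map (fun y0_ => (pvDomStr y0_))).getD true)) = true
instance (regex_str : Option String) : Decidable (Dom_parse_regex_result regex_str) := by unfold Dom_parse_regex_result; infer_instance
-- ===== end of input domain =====

-- B replaces A's token loop mutating an accumulator dict by a token membership set
-- queried from a comprehension over the seven fixed keys (objective: more idiomatic).

-- ===== PORT A =====
-- body of A's for-loop: 'if lang in result: result[lang] = True'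
def pvStepA (d : PySem.Dict String Bool) (lang : String) : PySem.Dict String Bool :=
  if d.contains lang then d.insert lang true else d

def parse_regex_result (regex_str : Option String) : List (String × Bool) :=
  let result : PySem.Dict String Bool :=
    PySem.Dict.ofList [("fr", false), ("de", false), ("en", false), ("lb", false),
                       ("pt", false), ("nl", false), ("other", false)]
  let result :=
    match regex_str with
    | none => result
    | some s =>
      if s ≠ "" then
        ((PySem.Str.split? s ",").getD []).foldl pvStepA result
      else result
  result.items

-- ===== PORT B =====
def parse_regex_result_alt (regex_str : Option String) : List (String × Bool) :=
  let toks : PySem.Set String :=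
    match regex_str with
    | some s => if s ≠ "" then PySem.Set.ofList ((PySem.Str.split? s ",").getD []) else PySem.Set.empty
    | none => PySem.Set.empty
  ["fr", "de", "en", "lb", "pt", "nl", "other"].map (fun k => (k, PySem.Set.contains toks k))

-- ===== PRECONDITION & SPEC =====
def Spec_parse_regex_result (regex_str : Option String) (out : List (String × Bool)) : Prop := out = parse_regex_result_alt regex_str
instance (regex_str : Option String) (out : List (String × Bool)) : Decidable (Spec_parse_regex_result regex_str out) := by unfold Spec_parse_regex_result; infer_instance

-- ===== CLAIM (what is proved, stated in full; the proofs are below) =====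
def Claim_equal_parse_regex_result : Prop := ∀ (regex_str : Option String), Dom_parse_regex_result regex_str → Spec_parse_regex_result regex_str (parse_regex_result regex_str)

-- ===== LEMMAS AND PROOFS =====

-- One step of A's loop on the fixed seven-key dict: the matching flag (if any) is set.
theorem pv_step (a b c d e f g : Bool) (t : String) :
    pvStepA (PySem.Dict.mk [("fr", a), ("de", b), ("en", c), ("lb", d), ("pt", e), ("nl", f), ("other", g)]) t =
    PySem.Dict.mk [("fr", a || ("fr" == t)), ("de", b || ("de" == t)), ("en", c || ("en" == t)),
      ("lb", d || ("lb" == t)), ("pt", e || ("pt" == t)), ("nl", f || ("nl" == t)),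
      ("other", g || ("other" == t))] := by
  by_cases hfr : t = "fr"
  · subst hfr; simp [pvStepA, PySem.Dict.contains, PySem.Dict.insert]
  · by_cases hde : t = "de"
    · subst hde; simp [pvStepA, PySem.Dict.contains, PySem.Dict.insert]
    · by_cases hen : t = "en"
      · subst hen; simp [pvStepA, PySem.Dict.contains, PySem.Dict.insert]
      · by_cases hlb : t = "lb"
        · subst hlb; simp [pvStepA, PySem.Dict.contains, PySem.Dict.insert]
        · by_cases hpt : t = "pt"
          · subst hpt; simp [pvStepA, PySem.Dict.contains, PySem.Dict.insert]
          · by_cases hnl : t = "nl"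
            · subst hnl; simp [pvStepA, PySem.Dict.contains, PySem.Dict.insert]
            · by_cases hot : t = "other"
              · subst hot; simp [pvStepA, PySem.Dict.contains, PySem.Dict.insert]
              · simp [pvStepA, PySem.Dict.contains, Ne.symm hfr, Ne.symm hde, Ne.symm hen,
                  Ne.symm hlb, Ne.symm hpt, Ne.symm hnl, Ne.symm hot]

-- Invariant of A's token fold on the fixed seven-key dict: each flag ends up
-- old-value OR "its key occurs among the tokens".
theorem pv_fold_invariant (ts : List String) (a b c d e f g : Bool) :
    (ts.foldl pvStepA
      (PySem.Dict.mk [("fr", a), ("de", b), ("en", c), ("lb", d), ("pt", e), ("nl", f), ("other", g)])) =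
    PySem.Dict.mk [("fr", a || ts.contains "fr"), ("de", b || ts.contains "de"),
      ("en", c || ts.contains "en"), ("lb", d || ts.contains "lb"), ("pt", e || ts.contains "pt"),
      ("nl", f || ts.contains "nl"), ("other", g || ts.contains "other")] := by
  induction ts generalizing a b c d e f g with
  | nil => simp
  | cons t ts ih =>
    rw [List.foldl_cons, pv_step, ih]
    have hbeq : ∀ (x y : String), (x == y) = decide (x = y) := fun x y => by
      by_cases h : x = y <;> simp [h]
    simp [Bool.or_assoc, hbeq]

theorem pv_set_contains (ts : List String) (k : String) :
    PySem.Set.contains (PySem.Set.ofList ts) k = ts.contains k := by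
  simp [PySem.Set.contains, PySem.Set.mem_ofList]

-- ===== VERDICT (by name: the statement is the Claim_ definition above) =====
theorem parse_regex_result_spec : Claim_equal_parse_regex_result := by
  intro regex_str _
  unfold Spec_parse_regex_result parse_regex_result parse_regex_result_alt
  cases regex_str with
  | none => decide
  | some s =>
    by_cases hs : s = ""
    · subst hs; decide
    · simp only [hs, if_pos, ne_eq, not_false_iff]
      rw [show PySem.Dict.ofList [("fr", false), ("de", false), ("en", false), ("lb", false),
            ("pt", false), ("nl", false), ("other", false)] =
          PySem.Dict.mk [("fr", false), ("de", false), ("en", false), ("lb", false),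
            ("pt", false), ("nl", false), ("other", false)] from by decide]
      rw [pv_fold_invariant]
      simp [pv_set_contains]
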